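-- pv_equiv track=rewrite | github.com/e-dorigatti/adventofcode | 2020/day14/solve.py | count_overlaps
-- ===== SOURCE A (Python) =====
-- def count_overlaps(addr1, addr2):
--     acc = 1
--     for a, b in zip(addr1, addr2):
--         if a == b == 'X':
--             acc *= 2
--         elif a != 'X' and b != 'X' and a != b:
--             return 0
--     return acc
-- ===== SOURCE B (Python) =====
-- def count_overlaps(addr1, addr2):
--     # Divide and conquer on the index range: the answer is a product of
--     # independent per-position factors (0 on a fixed-bit conflict, 2 on a
--     # double wildcard, 1 otherwise), so it can be computed over any partition
--     # of the range; recursion depth is O(log n), no accumulator, no early exit.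
--     n = min(len(addr1), len(addr2))
--
--     def go(lo, hi):
--         if hi <= lo:
--             return 1
--         if hi - lo == 1:
--             a, b = addr1[lo], addr2[lo]
--             if a == 'X' and b == 'X':
--                 return 2
--             if a != 'X' and b != 'X' and a != b:
--                 return 0
--             return 1
--         mid = (lo + hi) // 2
--         return go(lo, mid) * go(mid, hi)
--
--     return go(0, n)
-- ===== Notes on version B (the rewrite author's own statement) =====
-- stated objective: alternative
-- what changed: Replaces the early-exit accumulator loop by divide-and-conquer on the index range, multiplying per-position local factors (0 on conflict, 2 on double wildcard, 1 otherwise) over the two halves; correct because the answer is a product of independent per-position factors.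
import Mathlib
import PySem

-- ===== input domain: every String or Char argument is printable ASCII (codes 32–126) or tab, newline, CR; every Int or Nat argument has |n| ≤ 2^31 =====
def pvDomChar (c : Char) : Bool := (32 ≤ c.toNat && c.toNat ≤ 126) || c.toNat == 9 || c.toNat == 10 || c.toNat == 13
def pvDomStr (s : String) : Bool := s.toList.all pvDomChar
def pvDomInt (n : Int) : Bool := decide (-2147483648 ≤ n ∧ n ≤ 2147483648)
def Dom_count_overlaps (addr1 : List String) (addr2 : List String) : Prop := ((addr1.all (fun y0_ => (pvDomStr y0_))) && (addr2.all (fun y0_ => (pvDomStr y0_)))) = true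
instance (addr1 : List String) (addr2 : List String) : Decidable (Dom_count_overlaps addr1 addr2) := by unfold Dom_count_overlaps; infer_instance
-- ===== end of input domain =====

-- ===== PORT A =====
-- B recasts A's early-exit accumulator loop as divide-and-conquer on the index range, multiplying per-position local factors (same cost, different algorithm shape).
def coA_go : List (String × String) → Int → Int
  | [], acc => acc
  | (a, b) :: rest, acc =>
    if a = b ∧ b = "X" then coA_go rest (acc * 2)
    else if a ≠ "X" ∧ b ≠ "X" ∧ a ≠ b then 0
    else coA_go rest acc

def count_overlaps (addr1 : List String) (addr2 : List String) : Int :=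
  coA_go (addr1.zip addr2) 1

-- ===== PORT B =====
-- addr1[lo] with 0 ≤ lo < min(len addr1, len addr2) is always in range, so List.getD is exact here.
-- fuel = hi - lo bounds the recursion depth; it only makes the same computation total.
def coB_go (x y : List String) : Nat → Nat → Nat → Int
  | 0, _, _ => 1
  | fuel + 1, lo, hi =>
    if hi ≤ lo then 1
    else if hi - lo = 1 then
      let a := x.getD lo ""
      let b := y.getD lo ""
      if a = "X" ∧ b = "X" then 2
      else if a ≠ "X" ∧ b ≠ "X" ∧ a ≠ b then 0
      else 1
    else
      coB_go x y fuel lo ((lo + hi) / 2) * coB_go x y fuel ((lo + hi) / 2) hi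

def count_overlaps_alt (addr1 : List String) (addr2 : List String) : Int :=
  coB_go addr1 addr2 (min addr1.length addr2.length) 0 (min addr1.length addr2.length)

-- ===== PRECONDITION & SPEC =====
def Spec_count_overlaps (addr1 : List String) (addr2 : List String) (out : Int) : Prop := out = count_overlaps_alt addr1 addr2
instance (addr1 : List String) (addr2 : List String) (out : Int) : Decidable (Spec_count_overlaps addr1 addr2 out) := by unfold Spec_count_overlaps; infer_instance

-- ===== CLAIM (what is proved, stated in full; the proofs are below) =====
def Claim_equal_count_overlaps : Prop := ∀ (addr1 : List String) (addr2 : List String), Dom_count_overlaps addr1 addr2 → Spec_count_overlaps addr1 addr2 (count_overlaps addr1 addr2)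

-- ===== LEMMAS AND PROOFS =====
-- the per-position factor and the product of factors over a pair list
def coFactor (a b : String) : Int :=
  if a = "X" ∧ b = "X" then 2
  else if a ≠ "X" ∧ b ≠ "X" ∧ a ≠ b then 0
  else 1

def coProd : List (String × String) → Int
  | [] => 1
  | (a, b) :: rest => coFactor a b * coProd rest

theorem coProd_append (l1 l2 : List (String × String)) :
    coProd (l1 ++ l2) = coProd l1 * coProd l2 := by
  induction l1 with
  | nil => simp [coProd]
  | cons p t ih => obtain ⟨a, b⟩ := p; simp [coProd, ih]; ring

-- A's loop computes acc times the product of factors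
theorem coA_go_eq (ps : List (String × String)) (acc : Int) :
    coA_go ps acc = acc * coProd ps := by
  induction ps generalizing acc with
  | nil => simp [coA_go, coProd]
  | cons p rest ih =>
    obtain ⟨a, b⟩ := p
    rw [show coProd ((a, b) :: rest) = coFactor a b * coProd rest from rfl]
    by_cases hx : a = b ∧ b = "X"
    · obtain ⟨h1, h2⟩ := hx; subst h1; subst h2
      rw [show coA_go (("X", "X") :: rest) acc = coA_go rest (acc * 2) from by
            simp [coA_go], ih, show coFactor "X" "X" = 2 from by decide]
      ring
    · by_cases hc : a ≠ "X" ∧ b ≠ "X" ∧ a ≠ b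
      · have hf : coFactor a b = 0 := by
          unfold coFactor
          rw [if_neg (fun h => hc.2.2 (h.1.trans h.2.symm)), if_pos hc]
        rw [show coA_go ((a, b) :: rest) acc = 0 from by
              rw [coA_go, if_neg hx, if_pos hc], hf]
        ring
      · have hf : coFactor a b = 1 := by
          unfold coFactor
          rw [if_neg (fun h => hx ⟨h.1.trans h.2.symm, h.2⟩), if_neg hc]
        rw [show coA_go ((a, b) :: rest) acc = coA_go rest acc from by
              rw [coA_go, if_neg hx, if_neg hc], ih, hf]
        ring

-- B's divide-and-conquer computes the product of factors over the segment [lo, hi)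
theorem coB_go_eq (x y : List String) (fuel lo hi : Nat)
    (hf : hi - lo ≤ fuel) (hhi : hi ≤ (x.zip y).length) :
    coB_go x y fuel lo hi = coProd (((x.zip y).drop lo).take (hi - lo)) := by
  induction fuel generalizing lo hi with
  | zero =>
    have h0 : hi - lo = 0 := by omega
    rw [coB_go, h0]
    simp [coProd]
  | succ fuel ih =>
    rw [coB_go]
    by_cases h1 : hi ≤ lo
    · rw [if_pos h1]
      have h0 : hi - lo = 0 := by omega
      rw [h0]
      simp [coProd]
    · rw [if_neg h1]
      by_cases h2 : hi - lo = 1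
      · rw [if_pos h2, h2]
        have hlo : lo < (x.zip y).length := by omega
        have hlx : lo < x.length := by
          rw [List.length_zip] at hlo; omega
        have hly : lo < y.length := by
          rw [List.length_zip] at hlo; omega
        rw [List.drop_eq_getElem_cons hlo, List.take_succ_cons, List.take_zero]
        rw [List.getElem_zip]
        rw [show coProd [(x[lo], y[lo])] = coFactor x[lo] y[lo] from by
              simp [coProd]]
        rw [List.getD_eq_getElem?_getD, List.getD_eq_getElem?_getD,
          List.getElem?_eq_getElem hlx, List.getElem?_eq_getElem hly]
        simp only [Option.getD_some]
        rfl
      · rw [if_neg h2]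
        rw [ih lo ((lo + hi) / 2) (by omega) (by omega),
          ih ((lo + hi) / 2) hi (by omega) hhi,
          ← coProd_append]
        congr 1
        rw [show hi - lo = ((lo + hi) / 2 - lo) + (hi - (lo + hi) / 2) from by omega,
          List.take_add, List.drop_drop,
          show lo + ((lo + hi) / 2 - lo) = (lo + hi) / 2 from by omega]

-- ===== VERDICT (by name: the statement is the Claim_ definition above) =====
theorem count_overlaps_spec : Claim_equal_count_overlaps := by
  intro a1 a2 _
  unfold Spec_count_overlaps count_overlaps count_overlaps_alt
  rw [coA_go_eq, coB_go_eq a1 a2 (min a1.length a2.length) 0 (min a1.length a2.length) (by omega) (by simp),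
    Nat.sub_zero, List.drop_zero,
    show min a1.length a2.length = (a1.zip a2).length from List.length_zip.symm,
    List.take_length, one_mul]
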